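-- pv_equiv track=rewrite | github.com/evelynzhengg/Kirby | midterm.py | nearestPreSquareNumber
-- ===== SOURCE A (Python) =====
-- def digitCount(n):
--     count = 0
--     while n > 0:
--         n//= 10
--         count += 1
--     return count
--
-- def isPresquareNumber(n):
--     count = digitCount(n)
--     for i in range(digitCount(n),0,-1):
--         s = (n // (10**(count-1)))**2
--         if  s == n%(10**(count-1)):
--             return True
--     return False
--
-- def nearestPreSquareNumber(n):
--     diff = 0
--     while True:
--         if isPresquareNumber(n-diff):
--             return n-diff
--         elif isPresquareNumber(n+diff):
--             return n+diff
--         diff+=1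
-- ===== SOURCE B (Python) =====
-- def nearestPreSquareNumber(n):
--     # Presquare numbers are exactly d*10**(k-1) + d*d for a leading digit d in 1..9
--     # and digit count k with d*d < 10**(k-1).  For |n| <= 2**31 the nearest one has
--     # at most 12 digits, so enumerate those candidates directly and take the closest,
--     # ties broken toward the smaller candidate (as the outward scan does).
--     cands = [d * 10 ** (k - 1) + d * d
--              for k in range(2, 13)
--              for d in range(1, 10)
--              if d * d < 10 ** (k - 1)]
--     return min(cands, key=lambda c: (abs(c - n), c))
-- ===== Notes on version B (the rewrite author's own statement) =====
-- stated objective: faster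
-- what changed: Instead of scanning outward from n and testing each integer with a digit-count/leading-digit check, B enumerates the presquare numbers directly (d*10**(k-1)+d*d for leading digit d and digit count k up to 12, which covers all |n| <= 2**31) and returns the candidate minimizing (abs(c-n), c), reproducing the scan's tie-break toward the smaller number.
import Mathlib
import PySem

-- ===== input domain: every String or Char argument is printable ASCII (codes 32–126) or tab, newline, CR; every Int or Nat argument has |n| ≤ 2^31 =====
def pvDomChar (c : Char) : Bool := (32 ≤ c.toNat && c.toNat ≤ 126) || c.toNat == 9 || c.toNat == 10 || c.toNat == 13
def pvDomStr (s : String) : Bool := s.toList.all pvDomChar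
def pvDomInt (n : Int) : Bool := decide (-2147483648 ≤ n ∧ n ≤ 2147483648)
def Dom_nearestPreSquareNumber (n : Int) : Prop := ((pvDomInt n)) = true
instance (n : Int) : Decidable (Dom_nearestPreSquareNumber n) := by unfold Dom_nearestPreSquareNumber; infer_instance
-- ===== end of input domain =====

-- B replaces A's outward scan (testing every integer with a digit-count/leading-digit check)
-- by direct enumeration of the presquare numbers of at most twelve digits (enough for the
-- whole input domain) and one lexicographic min, avoiding A's distance-proportional scan.


-- ===== PORT A =====
-- while n > 0: n //= 10; count += 1
def digitCountLoop (n : Int) (count : Int) : Int :=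
  if 0 < n then digitCountLoop (PySem.Int.floordiv n 10) (count + 1) else count
termination_by n.toNat
decreasing_by
  rw [PySem.Int.floordiv_eq_ediv_of_pos (by norm_num)]; omega

def digitCount (n : Int) : Int := digitCountLoop n 0

-- for i in range(digitCount(n), 0, -1): s = (n // 10**(count-1))**2; if s == n % 10**(count-1): return True
-- (the body only runs when count ≥ 1, so the exponent count-1 is a Nat there: (count-1).toNat is exact)
def presqLoop (l : List Int) (n : Int) (count : Int) : Bool :=
  match l with
  | [] => false
  | _ :: rest =>
    let s := (PySem.Int.floordiv n (10 ^ (count - 1).toNat)) ^ 2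
    if s == PySem.Int.mod n (10 ^ (count - 1).toNat) then true
    else presqLoop rest n count

def isPresquareNumber (n : Int) : Bool :=
  let count := digitCount n
  presqLoop (PySem.List.pyRange (digitCount n) 0 (-1)) n count

-- while True: check n-diff, then n+diff, diff += 1.
-- Fuel makes the recursion structural; n.natAbs + 12 steps provably suffice (11 is presquare).
def nearLoop (n : Int) (diff : Int) (fuel : Nat) : Int :=
  match fuel with
  | 0 => 0
  | f + 1 =>
    if isPresquareNumber (n - diff) then n - diff
    else if isPresquareNumber (n + diff) then n + diff
    else nearLoop n (diff + 1) f

def nearestPreSquareNumber (n : Int) : Int := nearLoop n 0 (n.natAbs + 12)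

-- ===== PORT B =====
-- [d*10**(k-1) + d*d for k in range(2,13) for d in range(1,10) if d*d < 10**(k-1)]
-- (k runs over 2..12, so the exponent k-1 is a Nat: (k-1).toNat is exact)
def candList : List Int :=
  (PySem.List.pyRange 2 13 1).flatMap (fun k =>
    (((PySem.List.pyRange 1 10 1).filter (fun d => decide (d * d < 10 ^ (k - 1).toNat))).map
      (fun d => d * 10 ^ (k - 1).toNat + d * d)))

-- min(cands, key=lambda c: (abs(c-n), c)); candList is nonempty, so Python's min never raises
-- and the .getD 0 default is unreachable.
def nearestPreSquareNumber_alt (n : Int) : Int :=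
  (PySem.List.min2? candList (fun c => |c - n|) (fun c => c)).getD 0

-- ===== PRECONDITION & SPEC =====
def Spec_nearestPreSquareNumber (n : Int) (out : Int) : Prop := out = nearestPreSquareNumber_alt n
instance (n : Int) (out : Int) : Decidable (Spec_nearestPreSquareNumber n out) := by unfold Spec_nearestPreSquareNumber; infer_instance

-- ===== CLAIM (what is proved, stated in full; the proofs are below) =====
def Claim_equal_nearestPreSquareNumber : Prop := ∀ (n : Int), Dom_nearestPreSquareNumber n → Spec_nearestPreSquareNumber n (nearestPreSquareNumber n)

-- ===== LEMMAS AND PROOFS =====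

-- The shape of presquare numbers: leading digit d, c trailing digits holding d*d.
def pvShape (m : Int) : Prop :=
  ∃ (d : Int) (c : Nat), 1 ≤ d ∧ d ≤ 9 ∧ d * d < 10 ^ c ∧ m = d * 10 ^ c + d * d

lemma pv_ten_pow_pos (c : Nat) : (0 : Int) < 10 ^ c := pow_pos (by norm_num) c

lemma pv_window (m : Int) (c c' : Nat) (h1 : 10 ^ c ≤ m) (h2 : m < 10 ^ (c + 1))
    (h3 : 10 ^ c' ≤ m) (h4 : m < 10 ^ (c' + 1)) : c = c' := by
  rcases lt_trichotomy c c' with h | h | h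
  · have : (10 : Int) ^ (c + 1) ≤ 10 ^ c' := pow_le_pow_right₀ (by norm_num) (by omega)
    linarith
  · exact h
  · have : (10 : Int) ^ (c' + 1) ≤ 10 ^ c := pow_le_pow_right₀ (by norm_num) (by omega)
    linarith

-- digitCount: accumulator, base case, recurrence, and the digit-window bounds
lemma pv_dcl_stop (n c : Int) (h : ¬ 0 < n) : digitCountLoop n c = c := by
  rw [digitCountLoop]; simp [h]

lemma pv_dcl_acc : ∀ (M : Nat) (n c : Int), n.toNat ≤ M →
    digitCountLoop n c = c + digitCountLoop n 0 := by
  intro M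
  induction M with
  | zero =>
    intro n c h
    rw [pv_dcl_stop n c (by omega), pv_dcl_stop n 0 (by omega)]
    ring
  | succ M ih =>
    intro n c h
    by_cases hp : (0 : Int) < n
    · have hq : PySem.Int.floordiv n 10 = n / 10 :=
        PySem.Int.floordiv_eq_ediv_of_pos (by norm_num)
      have hdec : (PySem.Int.floordiv n 10).toNat ≤ M := by rw [hq]; omega
      rw [digitCountLoop]
      conv_rhs => rw [digitCountLoop]
      simp only [if_pos hp]
      rw [ih _ (c + 1) hdec, ih _ (0 + 1) hdec]
      ring
    · rw [pv_dcl_stop n c hp, pv_dcl_stop n 0 hp]; ring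

lemma pv_dc_nonpos (n : Int) (h : n ≤ 0) : digitCount n = 0 := by
  unfold digitCount; rw [digitCountLoop]; simp [show ¬ (0 : Int) < n by omega]

lemma pv_dc_rec (n : Int) (h : 0 < n) :
    digitCount n = 1 + digitCount (PySem.Int.floordiv n 10) := by
  unfold digitCount
  rw [digitCountLoop]
  simp only [if_pos h]
  rw [pv_dcl_acc (PySem.Int.floordiv n 10).toNat _ _ (le_refl _)]
  ring

lemma pv_dc_window : ∀ (M : Nat) (n : Int), 0 < n → n.toNat ≤ M →
    ∃ c : Nat, digitCount n = (c : Int) + 1 ∧ 10 ^ c ≤ n ∧ n < 10 ^ (c + 1) := by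
  intro M
  induction M with
  | zero => intro n h0 h1; exfalso; omega
  | succ M ih =>
    intro n h0 h1
    have hq : PySem.Int.floordiv n 10 = n / 10 :=
      PySem.Int.floordiv_eq_ediv_of_pos (by norm_num)
    by_cases hsm : n < 10
    · refine ⟨0, ?_, by simpa using h0, by simpa using hsm⟩
      rw [pv_dc_rec n h0, hq, show n / 10 = 0 by omega, pv_dc_nonpos 0 (le_refl _)]
      norm_num
    · have hqpos : 0 < n / 10 := by omega
      have hqle : (n / 10).toNat ≤ M := by omega
      obtain ⟨c, hdc, hlo, hhi⟩ := ih (n / 10) hqpos hqle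
      refine ⟨c + 1, ?_, ?_, ?_⟩
      · rw [pv_dc_rec n h0, hq, hdc]; push_cast; ring
      · have h9 : (10 : Int) ^ c * 10 ≤ (n / 10) * 10 :=
          mul_le_mul_of_nonneg_right hlo (by norm_num)
        have h10 : n / 10 * 10 ≤ n := by omega
        calc (10 : Int) ^ (c + 1) = 10 ^ c * 10 := by rw [pow_succ]
          _ ≤ n := le_trans h9 h10
      · have h1 : n < (n / 10 + 1) * 10 := by omega
        have h2 : (n / 10 + 1) * 10 ≤ 10 ^ (c + 1) * 10 :=
          mul_le_mul_of_nonneg_right (by omega) (by norm_num)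
        calc n < (n / 10 + 1) * 10 := h1
          _ ≤ 10 ^ (c + 1) * 10 := h2
          _ = 10 ^ (c + 1 + 1) := by ring

-- the loop body ignores the loop variable: the for-loop is one test on a nonempty range
lemma pv_presqLoop_eq (l : List Int) (n count : Int) :
    presqLoop l n count = (!l.isEmpty &&
      ((PySem.Int.floordiv n (10 ^ (count - 1).toNat)) ^ 2 ==
        PySem.Int.mod n (10 ^ (count - 1).toNat))) := by
  induction l with
  | nil => rfl
  | cons x rest ih =>
    show (if ((PySem.Int.floordiv n (10 ^ (count - 1).toNat)) ^ 2 ==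
        PySem.Int.mod n (10 ^ (count - 1).toNat)) = true then true
      else presqLoop rest n count) = _
    cases hb : ((PySem.Int.floordiv n (10 ^ (count - 1).toNat)) ^ 2 ==
        PySem.Int.mod n (10 ^ (count - 1).toNat)) with
    | true => rw [if_pos rfl, Bool.and_true]; rfl
    | false =>
      rw [if_neg (by decide), Bool.and_false, ih, hb, Bool.and_false]

lemma pv_isPresq_iff (m : Int) : isPresquareNumber m = true ↔ pvShape m := by
  constructor
  · intro h
    by_cases hm : 0 < m
    · obtain ⟨c, hdc, hlo, hhi⟩ := pv_dc_window m.toNat m hm (le_refl _)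
      simp only [isPresquareNumber] at h
      rw [pv_presqLoop_eq] at h
      have hct : ((digitCount m) - 1).toNat = c := by omega
      rw [hct] at h
      simp only [Bool.and_eq_true, beq_iff_eq] at h
      have hpos : (0 : Int) < 10 ^ c := pv_ten_pow_pos c
      rw [PySem.Int.floordiv_eq_ediv_of_pos hpos, PySem.Int.mod_eq_emod_of_pos hpos] at h
      have hcond := h.2
      set d := m / 10 ^ c with hd
      have hdm : 10 ^ c * d + m % 10 ^ c = m := Int.ediv_add_emod m (10 ^ c)
      have hr0 : 0 ≤ m % 10 ^ c := Int.emod_nonneg m (by positivity)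
      have hr1 : m % 10 ^ c < 10 ^ c := Int.emod_lt_of_pos m hpos
      have hd1 : 1 ≤ d := by
        rw [hd, Int.le_ediv_iff_mul_le hpos]; linarith
      have hd9 : d ≤ 9 := by
        have hlt : d < 10 := by
          rw [hd, Int.ediv_lt_iff_lt_mul hpos]
          calc m < 10 ^ (c + 1) := hhi
            _ = 10 * 10 ^ c := by rw [pow_succ]; ring
        omega
      have hmod : m % 10 ^ c = d * d := by rw [← hcond, sq]
      refine ⟨d, c, hd1, hd9, ?_, ?_⟩
      · rw [← hmod]; exact hr1
      · rw [← hmod]; linarith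
    · exfalso
      simp only [isPresquareNumber] at h
      rw [pv_dc_nonpos m (by omega), PySem.List.pyRange_neg_one_eq_nil (by norm_num)] at h
      simp [presqLoop] at h
  · rintro ⟨d, c, hd1, hd9, hdd, rfl⟩
    have hpos : (0 : Int) < 10 ^ c := pv_ten_pow_pos c
    have hdd0 : 0 ≤ d * d := mul_nonneg (by omega) (by omega)
    have hlo : 10 ^ c ≤ d * 10 ^ c + d * d := by nlinarith
    have hhi : d * 10 ^ c + d * d < 10 ^ (c + 1) := by
      have h9 : d * 10 ^ c ≤ 9 * 10 ^ c := mul_le_mul_of_nonneg_right hd9 (by positivity)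
      calc d * 10 ^ c + d * d < d * 10 ^ c + 10 ^ c := by linarith
        _ ≤ 9 * 10 ^ c + 10 ^ c := by linarith
        _ = 10 ^ (c + 1) := by rw [pow_succ]; ring
    have hm : 0 < d * 10 ^ c + d * d := by nlinarith
    obtain ⟨c', hdc, hlo', hhi'⟩ := pv_dc_window _ _ hm (le_refl _)
    have hcc : c' = c := pv_window _ c' c hlo' hhi' hlo hhi
    subst hcc
    simp only [isPresquareNumber]
    rw [pv_presqLoop_eq]
    have hct : ((digitCount (d * 10 ^ c' + d * d)) - 1).toNat = c' := by omega
    rw [hct]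
    have hne : PySem.List.pyRange (digitCount (d * 10 ^ c' + d * d)) 0 (-1) ≠ [] := by
      rw [PySem.List.pyRange_neg_one_cons (by omega)]; simp
    have hdiv : PySem.Int.floordiv (d * 10 ^ c' + d * d) (10 ^ c') = d := by
      rw [PySem.Int.floordiv_eq_iff_of_pos (pv_ten_pow_pos c')]
      constructor
      · nlinarith
      · nlinarith
    have hmod : PySem.Int.mod (d * 10 ^ c' + d * d) (10 ^ c') = d * d := by
      rw [PySem.Int.mod_eq_emod_of_pos (pv_ten_pow_pos c')]
      rw [show d * 10 ^ c' + d * d = d * d + 10 ^ c' * d by ring]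
      rw [Int.add_mul_emod_self_left]
      exact Int.emod_eq_of_lt hdd0 hdd
    rw [hdiv, hmod]
    simp only [Bool.and_eq_true, beq_iff_eq, Bool.not_eq_true', List.isEmpty_eq_false_iff]
    exact ⟨hne, by rw [sq]⟩

-- candidate list: membership characterization
lemma pv_mem_candList (x : Int) :
    x ∈ candList ↔ ∃ (d : Int) (c : Nat), 1 ≤ d ∧ d ≤ 9 ∧ 1 ≤ c ∧ c ≤ 11 ∧
      d * d < 10 ^ c ∧ x = d * 10 ^ c + d * d := by
  unfold candList
  simp only [List.mem_flatMap, List.mem_map, List.mem_filter,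
    PySem.List.mem_pyRange_one, decide_eq_true_eq]
  constructor
  · rintro ⟨k, ⟨hk2, hk13⟩, d, ⟨⟨hd1, hd10⟩, hdd⟩, rfl⟩
    exact ⟨d, (k - 1).toNat, hd1, by omega, by omega, by omega, hdd, rfl⟩
  · rintro ⟨d, c, hd1, hd9, hc1, hc11, hdd, rfl⟩
    refine ⟨(c : Int) + 1, ⟨by omega, by omega⟩, d, ⟨⟨hd1, by omega⟩, ?_⟩, ?_⟩
    · rw [show ((c : Int) + 1 - 1).toNat = c by omega]; exact hdd
    · rw [show ((c : Int) + 1 - 1).toNat = c by omega]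

lemma pv_shape_of_mem (x : Int) (h : x ∈ candList) : pvShape x := by
  obtain ⟨d, c, h1, h2, _, _, h5, h6⟩ := (pv_mem_candList x).mp h
  exact ⟨d, c, h1, h2, h5, h6⟩

lemma pv_mem_of_shape (x : Int) (h : pvShape x) (hlt : x < 10 ^ 12) : x ∈ candList := by
  obtain ⟨d, c, hd1, hd9, hdd, rfl⟩ := h
  have hpos : (0 : Int) < 10 ^ c := pv_ten_pow_pos c
  have hdd0 : 0 ≤ d * d := mul_nonneg (by omega) (by omega)
  have hc1 : 1 ≤ c := by
    by_contra hc
    have : c = 0 := by omega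
    subst this
    simp at hdd
    nlinarith
  have hc11 : c ≤ 11 := by
    by_contra hc
    have h12 : (10 : Int) ^ 12 ≤ 10 ^ c := pow_le_pow_right₀ (by norm_num) (by omega)
    have : (10 : Int) ^ c ≤ d * 10 ^ c + d * d := by nlinarith
    linarith
  exact (pv_mem_candList _).mpr ⟨d, c, hd1, hd9, hc1, hc11, hdd, rfl⟩

-- lexicographic "at least as close, ties toward the smaller number"
def pvLe (n a b : Int) : Prop := |a - n| < |b - n| ∨ (|a - n| = |b - n| ∧ a ≤ b)

lemma pvLe_trans {n a b c : Int} (h1 : pvLe n a b) (h2 : pvLe n b c) : pvLe n a c := by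
  rcases h1 with h1 | ⟨e1, l1⟩ <;> rcases h2 with h2 | ⟨e2, l2⟩
  · exact Or.inl (h1.trans h2)
  · exact Or.inl (e2 ▸ h1)
  · exact Or.inl (e1 ▸ h2)
  · exact Or.inr ⟨e1.trans e2, l1.trans l2⟩

-- min2? keeps a running lexicographic minimum
lemma pv_min2Go (n : Int) (l : List Int) : ∀ (m : Int), ∃ r : Int,
    PySem.List.min2? (m :: l) (fun c => |c - n|) (fun c => c) = some r
    ∧ (r = m ∨ r ∈ l) ∧ pvLe n r m ∧ ∀ y ∈ l, pvLe n r y := by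
  induction l with
  | nil =>
    intro m
    exact ⟨m, rfl, Or.inl rfl, Or.inr ⟨rfl, le_refl _⟩, by simp⟩
  | cons x l ih =>
    intro m
    by_cases hc : (decide (|x - n| < |m - n|) ||
        !decide (|m - n| < |x - n|) && decide (x < m)) = true
    · obtain ⟨r, hr, hmem, hle, hall⟩ := ih x
      have hxm : pvLe n x m := by
        simp only [Bool.or_eq_true, Bool.and_eq_true, Bool.not_eq_true',
          decide_eq_true_eq, decide_eq_false_iff_not] at hc
        rcases hc with h | ⟨h1, h2⟩
        · exact Or.inl h
        · by_cases hlt : |x - n| < |m - n|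
          · exact Or.inl hlt
          · exact Or.inr ⟨le_antisymm (not_lt.mp h1) (not_lt.mp hlt), le_of_lt h2⟩
      have hstep : PySem.List.min2? (m :: x :: l) (fun c => |c - n|) (fun c => c)
          = PySem.List.min2? (x :: l) (fun c => |c - n|) (fun c => c) := by
        simp only [PySem.List.min2?, List.foldl_cons]
        rw [if_pos hc]
      refine ⟨r, by rw [hstep]; exact hr, ?_, pvLe_trans hle hxm, ?_⟩
      · rcases hmem with rfl | h
        · exact Or.inr (List.mem_cons_self)
        · exact Or.inr (List.mem_cons_of_mem _ h)
      · intro y hy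
        rcases List.mem_cons.mp hy with rfl | hy
        · exact hle
        · exact hall y hy
    · obtain ⟨r, hr, hmem, hle, hall⟩ := ih m
      have hmx : pvLe n m x := by
        simp only [Bool.or_eq_true, Bool.and_eq_true, Bool.not_eq_true',
          decide_eq_true_eq, decide_eq_false_iff_not, not_or, not_and, not_lt] at hc
        obtain ⟨h1, h2⟩ := hc
        by_cases hlt : |m - n| < |x - n|
        · exact Or.inl hlt
        · exact Or.inr ⟨le_antisymm h1 (not_lt.mp hlt), h2 (not_lt.mp hlt)⟩
      have hstep : PySem.List.min2? (m :: x :: l) (fun c => |c - n|) (fun c => c)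
          = PySem.List.min2? (m :: l) (fun c => |c - n|) (fun c => c) := by
        simp only [PySem.List.min2?, List.foldl_cons]
        rw [if_neg hc]
      refine ⟨r, by rw [hstep]; exact hr, ?_, hle, ?_⟩
      · rcases hmem with rfl | h
        · exact Or.inl rfl
        · exact Or.inr (List.mem_cons_of_mem _ h)
      · intro y hy
        rcases List.mem_cons.mp hy with rfl | hy
        · exact pvLe_trans hle hmx
        · exact hall y hy

lemma pv_eleven_mem : (11 : Int) ∈ candList := by decide

lemma pv_y0_mem : (10000000001 : Int) ∈ candList := by
  refine pv_mem_of_shape _ ⟨1, 10, le_refl _, by norm_num, by norm_num, by norm_num⟩ (by norm_num)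

-- B's result: a candidate, lexicographically minimal among candidates
lemma pv_alt_spec (n : Int) : nearestPreSquareNumber_alt n ∈ candList ∧
    ∀ y ∈ candList, pvLe n (nearestPreSquareNumber_alt n) y := by
  have h11 := pv_eleven_mem
  rcases hE : candList with _ | ⟨x, rest⟩
  · rw [hE] at h11; simp at h11
  · obtain ⟨r, hr, hmem, hle, hall⟩ := pv_min2Go n rest x
    have halt : nearestPreSquareNumber_alt n = r := by
      unfold nearestPreSquareNumber_alt
      rw [hE, hr]
      rfl
    rw [halt]
    constructor
    · rcases hmem with rfl | h
      · exact List.mem_cons_self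
      · exact List.mem_cons_of_mem _ h
    · intro y hy
      rcases List.mem_cons.mp hy with rfl | hy
      · exact hle
      · exact hall y hy

-- optimality of B's result over ALL presquare numbers (uses |n| ≤ 2^31)
lemma pv_opt (n : Int) (hDom : Dom_nearestPreSquareNumber n) :
    ∀ m : Int, isPresquareNumber m = true → pvLe n (nearestPreSquareNumber_alt n) m := by
  intro m hm
  have hDom' : -2147483648 ≤ n ∧ n ≤ 2147483648 := by
    unfold Dom_nearestPreSquareNumber pvDomInt at hDom
    exact of_decide_eq_true hDom
  have hsh := (pv_isPresq_iff m).mp hm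
  unfold pvLe
  by_cases hlt : m < 10 ^ 12
  · exact (pv_alt_spec n).2 m (pv_mem_of_shape m hsh hlt)
  · -- m is huge; the candidate 10000000001 is strictly closer
    push_neg at hlt
    have hlt' : (1000000000000 : Int) ≤ m := by norm_num at hlt; exact hlt
    have hy0 := (pv_alt_spec n).2 _ pv_y0_mem
    have hstrict : |(10000000001 : Int) - n| < |m - n| := by
      have h1 : |(10000000001 : Int) - n| ≤ 12147483649 := by
        rw [abs_le]; omega
      have h2 : |m - n| = m - n := abs_of_nonneg (by omega)
      rw [h2]
      omega
    exact pvLe_trans hy0 (Or.inl hstrict)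

lemma pv_alt_presq (n : Int) : isPresquareNumber (nearestPreSquareNumber_alt n) = true :=
  (pv_isPresq_iff _).mpr (pv_shape_of_mem _ (pv_alt_spec n).1)

-- A's scan loop reaches exactly B's result
lemma pv_nearLoop_eq (n : Int) (hDom : Dom_nearestPreSquareNumber n) :
    ∀ (fuel : Nat) (diff : Int), 0 ≤ diff →
      diff ≤ |nearestPreSquareNumber_alt n - n| →
      |nearestPreSquareNumber_alt n - n| < diff + fuel →
      nearLoop n diff fuel = nearestPreSquareNumber_alt n := by
  intro fuel
  induction fuel with
  | zero =>
    intro diff h0 h1 h2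
    exfalso
    have hc : diff < diff := by simpa using lt_of_le_of_lt h1 h2
    exact absurd hc (lt_irrefl _)
  | succ f ih =>
    intro diff h0 h1 h2
    set t := nearestPreSquareNumber_alt n with ht
    by_cases hd : diff = |t - n|
    · by_cases hle : t ≤ n
      · have habs : |t - n| = n - t := by
          rw [abs_sub_comm]; exact abs_of_nonneg (by linarith)
        rw [habs] at hd
        have htn : n - diff = t := by linarith
        rw [nearLoop, htn, if_pos (pv_alt_presq n)]
      · push_neg at hle
        have habs : |t - n| = t - n := abs_of_nonneg (by linarith)
        rw [habs] at hd
        have htn : n + diff = t := by linarith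
        have hdpos : 0 < diff := by linarith
        have hfalse : isPresquareNumber (n - diff) = false := by
          by_contra hcon
          rw [Bool.not_eq_false] at hcon
          have hop := pv_opt n hDom _ hcon
          unfold pvLe at hop
          have habs2 : |n - diff - n| = diff := by
            rw [show n - diff - n = -diff by ring, abs_neg, abs_of_nonneg h0]
          rw [habs2, habs] at hop
          rcases hop with h | ⟨he, hl⟩ <;> linarith
        rw [nearLoop, hfalse]
        simp only [Bool.false_eq_true, if_false]
        rw [htn, if_pos (pv_alt_presq n)]
    · have hdlt : diff < |t - n| := lt_of_le_of_ne h1 hd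
      have hfar : ∀ m : Int, |m - n| = diff → isPresquareNumber m = false := by
        intro m hm
        by_contra hcon
        rw [Bool.not_eq_false] at hcon
        have hop := pv_opt n hDom m hcon
        unfold pvLe at hop
        rw [hm] at hop
        rcases hop with h | ⟨he, hl⟩ <;> linarith
      have hf1 : isPresquareNumber (n - diff) = false := by
        refine hfar _ ?_
        rw [show n - diff - n = -diff by ring, abs_neg, abs_of_nonneg h0]
      have hf2 : isPresquareNumber (n + diff) = false := by
        refine hfar _ ?_
        rw [show n + diff - n = diff by ring, abs_of_nonneg h0]
      rw [nearLoop, hf1, hf2]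
      simp only [Bool.false_eq_true, if_false]
      refine ih (diff + 1) (by linarith) (Int.add_one_le_iff.mpr hdlt) ?_
      push_cast at h2 ⊢
      linarith

-- ===== VERDICT (by name: the statement is the Claim_ definition above) =====
theorem nearestPreSquareNumber_spec : Claim_equal_nearestPreSquareNumber := by
  intro n hDom
  unfold Spec_nearestPreSquareNumber nearestPreSquareNumber
  have h11 := (pv_alt_spec n).2 _ pv_eleven_mem
  unfold pvLe at h11
  have hb : |nearestPreSquareNumber_alt n - n| ≤ |11 - n| := by
    rcases h11 with h | ⟨he, _⟩
    · exact le_of_lt h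
    · exact le_of_eq he
  have h1 : |(11 : Int) - n| < ((n.natAbs + 12 : Nat) : Int) := by
    rcases abs_cases ((11 : Int) - n) with ⟨he, _⟩ | ⟨he, _⟩ <;> rw [he] <;> omega
  refine pv_nearLoop_eq n hDom (n.natAbs + 12) 0 (le_refl _) (abs_nonneg _) ?_
  rw [zero_add]
  exact lt_of_le_of_lt hb h1
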